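-- pv_equiv track=rewrite | github.com/Legolasan/sql_learn | app/engine/execution_order.py | _apply_group_by
-- ===== SOURCE A (Python) =====
-- def _apply_group_by(data: list[dict], group_cols: list[str]) -> tuple[list[dict], int]:
--     """Apply GROUP BY."""
--     groups = {}
--     for row in data:
--         key = tuple(row.get(col) for col in group_cols)
--         if key not in groups:
--             groups[key] = []
--         groups[key].append(row)
--
--     # Return first row of each group with count
--     result = []
--     for key, rows in groups.items():
--         group_row = {**rows[0], '_count': len(rows)}
--         result.append(group_row)
--
--     return result, len(groups)
-- ===== SOURCE B (Python) =====
-- def _apply_group_by(data: list[dict], group_cols: list[str]) -> tuple[list[dict], int]: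
--     """Apply GROUP BY in a single pass: keep only the running aggregate row per key."""
--     groups = {}
--     for row in data:
--         key = tuple(row.get(col) for col in group_cols)
--         if key in groups:
--             groups[key]['_count'] += 1
--         else:
--             groups[key] = {**row, '_count': 1}
--     return list(groups.values()), len(groups)
-- ===== Notes on version B (the rewrite author's own statement) =====
-- stated objective: simpler
-- what changed: B folds grouping and aggregation into one pass that keeps only a running aggregate row ({**row, '_count': 1} / '_count' += 1) per key, instead of A's dict of full row lists plus a second reduction loop.
import Mathlib
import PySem

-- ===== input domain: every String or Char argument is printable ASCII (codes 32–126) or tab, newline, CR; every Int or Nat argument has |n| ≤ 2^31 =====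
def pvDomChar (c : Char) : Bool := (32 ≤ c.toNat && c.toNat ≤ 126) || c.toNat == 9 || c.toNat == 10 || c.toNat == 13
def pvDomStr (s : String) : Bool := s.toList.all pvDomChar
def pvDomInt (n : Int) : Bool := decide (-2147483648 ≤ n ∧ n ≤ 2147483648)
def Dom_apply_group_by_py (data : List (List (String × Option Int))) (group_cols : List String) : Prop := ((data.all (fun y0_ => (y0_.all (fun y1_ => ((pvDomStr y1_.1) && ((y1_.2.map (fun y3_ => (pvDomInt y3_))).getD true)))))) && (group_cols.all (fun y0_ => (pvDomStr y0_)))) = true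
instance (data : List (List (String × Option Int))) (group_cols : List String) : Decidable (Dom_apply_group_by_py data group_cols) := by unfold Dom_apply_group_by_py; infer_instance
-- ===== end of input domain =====

-- B replaces A's group-then-reduce (dict of full row lists + a second aggregation loop)
-- by a single pass that keeps only the running aggregate row per key (objective: simpler).

-- key = tuple(row.get(col) for col in group_cols)   (shared by both Pythons verbatim)
def pvKey (group_cols : List String) (row : List (String × Option Int)) : List (Option Int) :=
  group_cols.map (fun c => (PySem.Dict.mk row).getD c none)

-- ===== PORT A =====
-- loop body: if key not in groups: groups[key] = [];  groups[key].append(row)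
def pvStepA (group_cols : List String)
    (g : PySem.Dict (List (Option Int)) (List (List (String × Option Int))))
    (row : List (String × Option Int)) :
    PySem.Dict (List (Option Int)) (List (List (String × Option Int))) :=
  let k := pvKey group_cols row
  let g := if g.contains k then g else g.insert k []
  g.modify k [] (fun rs => rs ++ [row])

def apply_group_by_py (data : List (List (String × Option Int))) (group_cols : List String) : (List (List (String × Option Int))) × Int :=
  let groups := data.foldl (pvStepA group_cols) PySem.Dict.empty
  -- second loop: result.append({**rows[0], '_count': len(rows)})
  let result := groups.items.foldl
    (fun res kv =>
      res ++ [((PySem.Dict.mk (PySem.List.pyGetD kv.2 0 [])).insert "_count" (some (PySem.List.len kv.2))).items])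
    []
  (result, (groups.size : Int))

-- ===== PORT B =====
-- loop body: if key in groups: groups[key]['_count'] += 1 else groups[key] = {**row, '_count': 1}
def pvStepB (group_cols : List String)
    (g : PySem.Dict (List (Option Int)) (PySem.Dict String (Option Int)))
    (row : List (String × Option Int)) :
    PySem.Dict (List (Option Int)) (PySem.Dict String (Option Int)) :=
  let k := pvKey group_cols row
  if g.contains k then
    g.modify k PySem.Dict.empty (fun r => r.modify "_count" (some 0) (fun v => some (v.getD 0 + 1)))
  else
    g.insert k ((PySem.Dict.mk row).insert "_count" (some 1))

def apply_group_by_py_alt (data : List (List (String × Option Int))) (group_cols : List String) : (List (List (String × Option Int))) × Int :=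
  let groups := data.foldl (pvStepB group_cols) PySem.Dict.empty
  (groups.values.map (fun r => r.items), (groups.size : Int))

-- ===== PRECONDITION & SPEC =====
def Spec_apply_group_by_py (data : List (List (String × Option Int))) (group_cols : List String) (out : (List (List (String × Option Int))) × Int) : Prop := out = apply_group_by_py_alt data group_cols
instance (data : List (List (String × Option Int))) (group_cols : List String) (out : (List (List (String × Option Int))) × Int) : Decidable (Spec_apply_group_by_py data group_cols out) := by unfold Spec_apply_group_by_py; infer_instance

-- ===== CLAIM (what is proved, stated in full; the proofs are below) =====
def Claim_equal_apply_group_by_py : Prop := ∀ (data : List (List (String × Option Int))) (group_cols : List String), Dom_apply_group_by_py data group_cols → Spec_apply_group_by_py data group_cols (apply_group_by_py data group_cols)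

-- ===== LEMMAS AND PROOFS =====

-- the aggregate row B keeps for a group whose collected rows (in A) are rs
def pvG (rs : List (List (String × Option Int))) : PySem.Dict String (Option Int) :=
  (PySem.Dict.mk (rs.getD 0 [])).insert "_count" (some (rs.length : Int))

-- lookups through the value-wise image
theorem pv_get?_map (l : List ((List (Option Int)) × List (List (String × Option Int)))) (k : List (Option Int)) :
    (PySem.Dict.mk (l.map (fun p => (p.1, pvG p.2)))).get? k
      = ((PySem.Dict.mk l).get? k).map pvG := by
  induction l with
  | nil => simp [PySem.Dict.get?]
  | cons p l ih =>
    by_cases h : (p.1 == k) = true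
    · simp [PySem.Dict.get?, List.find?, h]
    · simp [PySem.Dict.get?, List.find?, h] at ih ⊢
      exact ih


-- contains through the value-wise image
theorem pv_contains_map (l : List ((List (Option Int)) × List (List (String × Option Int)))) (k : List (Option Int)) :
    (PySem.Dict.mk (l.map (fun p => (p.1, pvG p.2)))).contains k
      = (PySem.Dict.mk l).contains k := by
  simp [PySem.Dict.contains, List.any_map, Function.comp_def]

-- one loop step preserves the relation between A's and B's group dicts
theorem pv_step (group_cols : List String) (row : List (String × Option Int))
    (ga : PySem.Dict (List (Option Int)) (List (List (String × Option Int))))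
    (gb : PySem.Dict (List (Option Int)) (PySem.Dict String (Option Int)))
    (hrel : gb.items = ga.items.map (fun p => (p.1, pvG p.2)))
    (hne : ∀ p ∈ ga.items, p.2 ≠ []) :
    (pvStepB group_cols gb row).items
      = (pvStepA group_cols ga row).items.map (fun p => (p.1, pvG p.2))
    ∧ ∀ p ∈ (pvStepA group_cols ga row).items, p.2 ≠ [] := by
  have hgb : gb = PySem.Dict.mk (ga.items.map (fun p => (p.1, pvG p.2))) := by
    cases gb; cases hrel; rfl
  have hcont : gb.contains (pvKey group_cols row) = ga.contains (pvKey group_cols row) := by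
    rw [hgb, pv_contains_map]
  by_cases hc : ga.contains (pvKey group_cols row) = true
  · -- key already present
    obtain ⟨v, hv⟩ : ∃ v, ga.get? (pvKey group_cols row) = some v := by
      rw [PySem.Dict.contains_eq_isSome_get?] at hc
      exact Option.isSome_iff_exists.mp hc
    have hvne : v ≠ [] := hne _ (PySem.Dict.mem_items_of_get?_eq_some _ hv)
    have hgetb : gb.get? (pvKey group_cols row) = some (pvG v) := by
      rw [hgb, pv_get?_map, hv]; rfl
    have hA : pvStepA group_cols ga row
        = ga.insert (pvKey group_cols row) (v ++ [row]) := by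
      simp [pvStepA, hc, PySem.Dict.modify, PySem.Dict.getD, hv]
    have hFB : (gb.getD (pvKey group_cols row) PySem.Dict.empty).modify "_count" (some 0)
          (fun w => some (w.getD 0 + 1)) = pvG (v ++ [row]) := by
      rw [PySem.Dict.getD_of_get?_eq_some _ _ hgetb, PySem.Dict.modify]
      have hGv : (pvG v).getD "_count" (some 0) = some ((v.length : Int)) := by
        simp only [pvG]; exact PySem.Dict.getD_insert_self _ _ _ _
      rw [hGv]
      simp only [pvG, PySem.Dict.insert_insert_self, Option.getD_some]
      obtain ⟨x, v', rfl⟩ : ∃ x v', v = x :: v' := by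
        cases v with | nil => exact absurd rfl hvne | cons x v' => exact ⟨x, v', rfl⟩
      simp only [List.getD, List.getElem?_cons_zero, List.cons_append, List.length_cons,
        List.length_append, Option.getD_some]
      congr 2
    have hB : pvStepB group_cols gb row
        = gb.insert (pvKey group_cols row) (pvG (v ++ [row])) := by
      simp [pvStepB, hcont, hc, PySem.Dict.modify]
      rw [← hFB]; rfl
    refine ⟨?_, ?_⟩
    · rw [hA, hB, PySem.Dict.items_insert_of_contains _ _ (by rw [hcont]; exact hc),
        PySem.Dict.items_insert_of_contains _ _ hc, hrel, List.map_map, List.map_map]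
      refine List.map_congr_left (fun p hp => ?_)
      by_cases hpk : (p.1 == pvKey group_cols row) = true <;> simp [Function.comp, hpk]
    · rw [hA, PySem.Dict.items_insert_of_contains _ _ hc]
      intro p hp
      obtain ⟨q, hq, rfl⟩ := List.mem_map.mp hp
      by_cases hqk : (q.1 == pvKey group_cols row) = true
      · simp [hqk]
      · simpa [hqk] using hne _ hq
  · -- new key
    have hc' : ga.contains (pvKey group_cols row) = false := by
      simpa using hc
    have hA : pvStepA group_cols ga row
        = ga.insert (pvKey group_cols row) [row] := by
      simp [pvStepA, hc', PySem.Dict.modify, PySem.Dict.getD_insert_self,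
        PySem.Dict.insert_insert_self]
    have hB : pvStepB group_cols gb row
        = gb.insert (pvKey group_cols row) ((PySem.Dict.mk row).insert "_count" (some 1)) := by
      simp [pvStepB, hcont, hc']
    refine ⟨?_, ?_⟩
    · rw [hA, hB, PySem.Dict.items_insert_of_not_contains _ _ (by rw [hcont]; exact hc'),
        PySem.Dict.items_insert_of_not_contains _ _ hc', hrel, List.map_append]
      rfl
    · rw [hA, PySem.Dict.items_insert_of_not_contains _ _ hc']
      intro p hp
      rcases List.mem_append.mp hp with h | h
      · exact hne _ h
      · simp at h; subst h; simp

theorem pv_inv (group_cols : List String) (data : List (List (String × Option Int)))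
    (ga : PySem.Dict (List (Option Int)) (List (List (String × Option Int))))
    (gb : PySem.Dict (List (Option Int)) (PySem.Dict String (Option Int)))
    (hrel : gb.items = ga.items.map (fun p => (p.1, pvG p.2)))
    (hne : ∀ p ∈ ga.items, p.2 ≠ []) :
    (data.foldl (pvStepB group_cols) gb).items
      = (data.foldl (pvStepA group_cols) ga).items.map (fun p => (p.1, pvG p.2))
    ∧ ∀ p ∈ (data.foldl (pvStepA group_cols) ga).items, p.2 ≠ [] := by
  induction data generalizing ga gb with
  | nil => exact ⟨hrel, hne⟩
  | cons row data ih =>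
    obtain ⟨h1, h2⟩ := pv_step group_cols row ga gb hrel hne
    simpa using ih _ _ h1 h2

-- ===== VERDICT (by name: the statement is the Claim_ definition above) =====
theorem apply_group_by_py_spec : Claim_equal_apply_group_by_py := by
  intro data group_cols _
  obtain ⟨h1, h2⟩ := pv_inv group_cols data PySem.Dict.empty PySem.Dict.empty rfl (by simp [PySem.Dict.empty])
  show apply_group_by_py data group_cols = apply_group_by_py_alt data group_cols
  show ((List.foldl (pvStepA group_cols) PySem.Dict.empty data).items.foldl
      (fun res kv =>
        res ++ [((PySem.Dict.mk (PySem.List.pyGetD kv.2 0 [])).insert "_count" (some (PySem.List.len kv.2))).items])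
      [],
      ((List.foldl (pvStepA group_cols) PySem.Dict.empty data).size : Int))
    = ((List.foldl (pvStepB group_cols) PySem.Dict.empty data).values.map (fun r => r.items),
      ((List.foldl (pvStepB group_cols) PySem.Dict.empty data).size : Int))
  rw [PySem.List.foldl_append_singleton_eq_map]
  refine Prod.ext ?_ ?_
  · show _ = (List.foldl (pvStepB group_cols) PySem.Dict.empty data).values.map _
    rw [PySem.Dict.values, h1, List.map_map, List.map_map]
    exact (List.map_congr_left (fun p hp => by
      simp [Function.comp, pvG, PySem.List.pyGetD_zero, PySem.List.len_eq])).symm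
  · show ((List.foldl (pvStepA group_cols) PySem.Dict.empty data).size : Int) = _
    simp [PySem.Dict.size, h1]
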